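-- pv_equiv track=rewrite | github.com/notvo-1/UTN-TUPaD-P1 | integracion_mat/trabajoMatematica.py | frecuencia_digito
-- ===== SOURCE A (Python) =====
-- def frecuencia_digito(cadena_numero):
--     cadena_numero = sorted(cadena_numero)
--     frecuencia = {}
--     for digito in cadena_numero:
--         if digito in frecuencia:
--             frecuencia[digito] += 1
--         else:
--             frecuencia[digito] = 1
--     return frecuencia
-- ===== SOURCE B (Python) =====
-- def frecuencia_digito(cadena_numero):
--     return {c: cadena_numero.count(c) for c in sorted(set(cadena_numero))}
-- ===== Notes on version B (the rewrite author's own statement) =====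
-- stated objective: idiomatic
-- what changed: Instead of sorting the whole input and growing a counter dict with an in-test per element, B takes the distinct characters via set(), sorts only those, and maps each to cadena_numero.count(c) in one dict comprehension.
import Mathlib
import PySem

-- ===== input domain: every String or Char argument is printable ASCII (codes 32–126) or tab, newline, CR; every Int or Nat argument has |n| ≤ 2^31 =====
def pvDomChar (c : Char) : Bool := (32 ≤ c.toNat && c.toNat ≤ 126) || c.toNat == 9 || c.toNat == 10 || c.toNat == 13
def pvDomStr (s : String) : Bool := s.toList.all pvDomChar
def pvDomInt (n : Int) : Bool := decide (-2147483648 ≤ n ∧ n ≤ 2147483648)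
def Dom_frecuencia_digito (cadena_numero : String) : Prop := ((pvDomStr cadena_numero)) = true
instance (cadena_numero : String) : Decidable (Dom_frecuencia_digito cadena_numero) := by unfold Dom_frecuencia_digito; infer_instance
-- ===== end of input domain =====

-- B replaces A's sort-everything-then-count-into-a-dict loop by sorting the distinct
-- characters and counting each with str.count (idiomatic dict comprehension); same result.


-- ===== PORT A =====
-- Python dict keys are the 1-char strings of the input; we carry them as Char (sorting
-- singleton strings = sorting code points) and render with Char.toString at the end.
def frecuencia_digito (cadena_numero : String) : List (String × Int) :=
  let cs := PySem.List.sorted cadena_numero.toList id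
  let d := cs.foldl
    (fun d c =>
      if d.contains c then d.insert c (d.getD c 0 + 1)   -- frecuencia[digito] += 1
      else d.insert c 1)                                 -- frecuencia[digito] = 1
    PySem.Dict.empty
  d.items.map (fun p => (p.1.toString, p.2))

-- ===== PORT B =====
def frecuencia_digito_alt (cadena_numero : String) : List (String × Int) :=
  (PySem.List.sorted (PySem.Set.ofList cadena_numero.toList) id).map
    (fun c => (c.toString, (PySem.Str.count cadena_numero c.toString : Int)))

-- ===== PRECONDITION & SPEC =====
def Spec_frecuencia_digito (cadena_numero : String) (out : List (String × Int)) : Prop := out = frecuencia_digito_alt cadena_numero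
instance (cadena_numero : String) (out : List (String × Int)) : Decidable (Spec_frecuencia_digito cadena_numero out) := by unfold Spec_frecuencia_digito; infer_instance

-- ===== CLAIM (what is proved, stated in full; the proofs are below) =====
def Claim_equal_frecuencia_digito : Prop := ∀ (cadena_numero : String), Dom_frecuencia_digito cadena_numero → Spec_frecuencia_digito cadena_numero (frecuencia_digito cadena_numero)

-- ===== LEMMAS AND PROOFS =====

-- counting a single-character substring is counting that character
theorem chars_count_go_singleton (c : Char) (l : List Char) (fuel acc : Nat)
    (h : l.length ≤ fuel) :
    PySem.Chars.count.go [c] fuel l acc = acc + l.count c := by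
  induction l generalizing fuel acc with
  | nil => cases fuel <;> simp [PySem.Chars.count.go]
  | cons x t ih =>
    cases fuel with
    | zero => simp at h
    | succ fuel =>
      simp only [List.length_cons] at h
      by_cases hx : c = x
      · subst hx
        simp [PySem.Chars.count.go, List.isPrefixOf, ih fuel (acc + 1) (by omega)]
        omega
      · simp [PySem.Chars.count.go, List.isPrefixOf, beq_iff_eq, hx, Ne.symm hx,
          ih fuel acc (by omega)]

theorem chars_count_singleton (s : List Char) (c : Char) :
    PySem.Chars.count s [c] = s.count c := by
  simp [PySem.Chars.count, chars_count_go_singleton c s s.length 0 le_rfl]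

-- the deduplicated list is a sublist of the original
theorem ofList_sublist {α : Type} [BEq α] [LawfulBEq α] (xs : List α) :
    (PySem.Set.ofList xs).Sublist xs := by
  induction xs using List.reverseRecOn with
  | nil => simp [PySem.Set.ofList_nil]
  | append_singleton xs x ih =>
    rw [PySem.Set.ofList_append_singleton, PySem.Set.add_eq_ite]
    split_ifs with h
    · exact ih.trans (List.sublist_append_left xs [x])
    · exact ih.append_right [x]

-- sorting the distinct characters = deduplicating the sorted characters
theorem sorted_ofList_eq (l : List Char) :
    PySem.List.sorted (PySem.Set.ofList l) id
      = PySem.Set.ofList (PySem.List.sorted l id) := by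
  apply PySem.List.sorted_eq_of_perm_of_pairwise_lt
  · -- both sides are Nodup with the same members
    rw [List.perm_ext_iff_of_nodup (PySem.Set.nodup_ofList _) (PySem.Set.nodup_ofList _)]
    intro a
    rw [PySem.Set.mem_ofList, PySem.Set.mem_ofList,
      (PySem.List.sorted_perm l id false).mem_iff]
  · -- a Nodup sublist of a ≤-sorted list is <-sorted
    have hsub := ofList_sublist (PySem.List.sorted l id)
    have hle := List.Pairwise.sublist hsub (PySem.List.sorted_pairwise l id)
    have hne : (PySem.Set.ofList (PySem.List.sorted l id)).Pairwise (· ≠ ·) :=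
      PySem.Set.nodup_ofList _
    exact (hle.and hne).imp (fun ⟨h1, h2⟩ => lt_of_le_of_ne h1 h2)

-- ===== VERDICT (by name: the statement is the Claim_ definition above) =====
theorem frecuencia_digito_spec : Claim_equal_frecuencia_digito := by
  intro s _
  unfold Spec_frecuencia_digito frecuencia_digito frecuencia_digito_alt
  have hloop :
      (PySem.List.sorted s.toList id).foldl
        (fun d c =>
          if d.contains c then d.insert c (d.getD c 0 + 1) else d.insert c 1)
        PySem.Dict.empty
      = PySem.Dict.counter (PySem.List.sorted s.toList id) := by
    rw [← PySem.Dict.foldl_insert_getD_add_one_eq_counter]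
    apply PySem.List.foldl_congr_mem
    intro d c _
    by_cases h : d.contains c
    · simp [h]
    · simp [h, PySem.Dict.getD_of_not_contains d (0:Int) (by simpa using h)]
  simp only [hloop, PySem.Dict.items_counter, sorted_ofList_eq, List.map_map]
  apply List.map_congr_left
  intro c _
  simp [PySem.Str.count_eq, Char.toString, chars_count_singleton,
    (PySem.List.sorted_perm s.toList id false).count_eq]
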